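-- pv_equiv track=rewrite | github.com/mortyc126-debug/SHA | verify_combined_v2_fix.py | sha256_rounds
-- ===== SOURCE A (Python) =====
-- K = [0x428a2f98,0x71374491,0xb5c0fbcf,0xe9b5dba5,0x3956c25b,0x59f111f1,0x923f82a4,0xab1c5ed5,
--      0xd807aa98,0x12835b01,0x243185be,0x550c7dc3,0x72be5d74,0x80deb1fe,0x9bdc06a7,0xc19bf174]
--
-- IV = [0x6a09e667,0xbb67ae85,0x3c6ef372,0xa54ff53a,0x510e527f,0x9b05688c,0x1f83d9ab,0x5be0cd19]
--
-- def rotr(x, n):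
--     return ((x >> n) | (x << (32 - n))) & 0xFFFFFFFF
--
-- def sha256_rounds(W, nr):
--     w = list(W[:16])
--     for i in range(16, max(nr, 16)):
--         s0 = rotr(w[i-15], 7) ^ rotr(w[i-15], 18) ^ (w[i-15] >> 3)
--         s1 = rotr(w[i-2], 17) ^ rotr(w[i-2], 19) ^ (w[i-2] >> 10)
--         w.append((w[i-16] + s0 + w[i-7] + s1) & 0xFFFFFFFF)
--     a, b, c, d, e, f, g, h = IV
--     for i in range(nr):
--         S1 = rotr(e, 6) ^ rotr(e, 11) ^ rotr(e, 25)
--         ch = (e & f) ^ ((~e) & g) & 0xFFFFFFFF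
--         t1 = (h + S1 + ch + K[i] + w[i]) & 0xFFFFFFFF
--         S0 = rotr(a, 2) ^ rotr(a, 13) ^ rotr(a, 22)
--         maj = (a & b) ^ (a & c) ^ (b & c)
--         t2 = (S0 + maj) & 0xFFFFFFFF
--         h, g, f, e, d, c, b, a = g, f, e, (d + t1) & 0xFFFFFFFF, c, b, a, (t1 + t2) & 0xFFFFFFFF
--     return [a, b, c, d, e, f, g, h]
-- ===== SOURCE B (Python) =====
-- K = [0x428a2f98,0x71374491,0xb5c0fbcf,0xe9b5dba5,0x3956c25b,0x59f111f1,0x923f82a4,0xab1c5ed5,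
--      0xd807aa98,0x12835b01,0x243185be,0x550c7dc3,0x72be5d74,0x80deb1fe,0x9bdc06a7,0xc19bf174]
--
-- IV = [0x6a09e667,0xbb67ae85,0x3c6ef372,0xa54ff53a,0x510e527f,0x9b05688c,0x1f83d9ab,0x5be0cd19]
--
-- MOD = 1 << 32
--
-- def _rr(x, n):
--     return ((x >> n) | (x << (32 - n))) % MOD
--
-- def _Sigma1(e):
--     return _rr(e, 6) ^ _rr(e, 11) ^ _rr(e, 25)
--
-- def _Sigma0(a):
--     return _rr(a, 2) ^ _rr(a, 13) ^ _rr(a, 22)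
--
-- def _ch(e, f, g):
--     return (e & f) ^ ((~e) & g) % MOD
--
-- def _maj(a, b, c):
--     return (a & b) ^ (a & c) ^ (b & c)
--
-- def _round(state, k, wi):
--     a, b, c, d, e, f, g, h = state
--     t1 = (h + _Sigma1(e) + _ch(e, f, g) + k + wi) % MOD
--     t2 = (_Sigma0(a) + _maj(a, b, c)) % MOD
--     return ((t1 + t2) % MOD, a, b, c, (d + t1) % MOD, e, f, g)
--
-- def sha256_rounds(W, nr):
--     # the schedule-extension loop of the original is dead code: with only 16
--     # round constants, no schedule word past index 15 is ever consumable
--     def go(state, i):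
--         if i >= nr:
--             return state
--         return go(_round(state, K[i], W[i]), i + 1)
--     return list(go(tuple(IV), 0))
-- ===== Notes on version B (the rewrite author's own statement) =====
-- stated objective: simpler
-- what changed: B deletes A's dead message-schedule-extension loop (no schedule word past index 15 is ever consumable: K[i] raises first for nr>16) and replaces A's loop of inlined expressions with a tail-recursive helper folding a named round function built from Sigma/ch/maj helper functions, with % 2**32 in place of the 0xFFFFFFFF mask.
import Mathlib
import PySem

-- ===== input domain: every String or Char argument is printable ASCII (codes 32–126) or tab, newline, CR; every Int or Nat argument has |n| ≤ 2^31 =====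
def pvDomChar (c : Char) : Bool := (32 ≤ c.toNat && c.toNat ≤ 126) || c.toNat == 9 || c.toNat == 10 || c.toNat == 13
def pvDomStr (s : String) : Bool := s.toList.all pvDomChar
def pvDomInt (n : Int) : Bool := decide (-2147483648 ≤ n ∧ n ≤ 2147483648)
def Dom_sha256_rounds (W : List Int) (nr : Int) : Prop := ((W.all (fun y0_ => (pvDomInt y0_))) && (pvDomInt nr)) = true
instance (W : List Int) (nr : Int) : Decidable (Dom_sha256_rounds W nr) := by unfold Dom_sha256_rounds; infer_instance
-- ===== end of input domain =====

-- B drops A's dead schedule-extension loop (with 16 round constants no schedule word past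
-- index 15 is ever consumable) and replaces A's loop of inlined expressions by a tail-recursive
-- helper applying a named round function built from Σ/ch/maj helpers, with % 2**32 in place of
-- the 0xFFFFFFFF mask; simpler, same cost.

-- ===== PORT A =====
def pvK : List Int :=
  [0x428a2f98, 0x71374491, 0xb5c0fbcf, 0xe9b5dba5, 0x3956c25b, 0x59f111f1, 0x923f82a4, 0xab1c5ed5,
   0xd807aa98, 0x12835b01, 0x243185be, 0x550c7dc3, 0x72be5d74, 0x80deb1fe, 0x9bdc06a7, 0xc19bf174]

-- rotr(x, n); n is always a literal 2..25 in A, ported as Nat (Python << >> on a nonneg literal)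
def pvRotr (x : Int) (n : Nat) : Int :=
  PySem.Int.band (PySem.Int.bor (x >>> n) (x <<< (32 - n))) 0xFFFFFFFF

-- state (a, b, c, d, e, f, g, h)
-- body of A's compression loop over index i (K[i], w[i] via pyGetD: in range under Pre_)
def pvStepA (w : List Int) (st : Int × Int × Int × Int × Int × Int × Int × Int) (i : Int) :
    Int × Int × Int × Int × Int × Int × Int × Int :=
  let (a, b, c, d, e, f, g, h) := st
  let S1 := PySem.Int.bxor (PySem.Int.bxor (pvRotr e 6) (pvRotr e 11)) (pvRotr e 25)
  -- Python precedence: & binds tighter than ^, so the mask applies to (~e)&g only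
  let ch := PySem.Int.bxor (PySem.Int.band e f) (PySem.Int.band (PySem.Int.band (Int.not e) g) 0xFFFFFFFF)
  let t1 := PySem.Int.band (h + S1 + ch + PySem.List.pyGetD pvK i 0 + PySem.List.pyGetD w i 0) 0xFFFFFFFF
  let S0 := PySem.Int.bxor (PySem.Int.bxor (pvRotr a 2) (pvRotr a 13)) (pvRotr a 22)
  let maj := PySem.Int.bxor (PySem.Int.bxor (PySem.Int.band a b) (PySem.Int.band a c)) (PySem.Int.band b c)
  let t2 := PySem.Int.band (S0 + maj) 0xFFFFFFFF
  (PySem.Int.band (t1 + t2) 0xFFFFFFFF, a, b, c, PySem.Int.band (d + t1) 0xFFFFFFFF, e, f, g)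

def sha256_rounds (W : List Int) (nr : Int) : List Int :=
  -- w = list(W[:16])
  let w0 := PySem.List.slice W none (some 16)
  -- schedule-extension loop: for i in range(16, max(nr, 16)) (w[..] via pyGetD: raises are outside Pre_)
  let w := (PySem.List.pyRange 16 (max nr 16) 1).foldl (fun w i =>
    let x15 := PySem.List.pyGetD w (i - 15) 0
    let x2 := PySem.List.pyGetD w (i - 2) 0
    let s0 := PySem.Int.bxor (PySem.Int.bxor (pvRotr x15 7) (pvRotr x15 18)) (x15 >>> 3)
    let s1 := PySem.Int.bxor (PySem.Int.bxor (pvRotr x2 17) (pvRotr x2 19)) (x2 >>> 10)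
    w ++ [PySem.Int.band (PySem.List.pyGetD w (i - 16) 0 + s0 + PySem.List.pyGetD w (i - 7) 0 + s1) 0xFFFFFFFF]) w0
  -- a, b, c, d, e, f, g, h = IV  (the module constant, unpacked)
  let st := (PySem.List.pyRange 0 nr 1).foldl (pvStepA w)
    (0x6a09e667, 0xbb67ae85, 0x3c6ef372, 0xa54ff53a, 0x510e527f, 0x9b05688c, 0x1f83d9ab, 0x5be0cd19)
  let (a, b, c, d, e, f, g, h) := st
  [a, b, c, d, e, f, g, h]

-- ===== PORT B =====  (transliteration of Source B)
def pvKB : List Int :=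
  [0x428a2f98, 0x71374491, 0xb5c0fbcf, 0xe9b5dba5, 0x3956c25b, 0x59f111f1, 0x923f82a4, 0xab1c5ed5,
   0xd807aa98, 0x12835b01, 0x243185be, 0x550c7dc3, 0x72be5d74, 0x80deb1fe, 0x9bdc06a7, 0xc19bf174]

-- MOD = 1 << 32
def pvMOD : Int := 4294967296

-- _rr(x, n)
def pvRrB (x : Int) (n : Nat) : Int :=
  PySem.Int.mod (PySem.Int.bor (x >>> n) (x <<< (32 - n))) pvMOD

-- _Sigma1(e)
def pvSigma1 (e : Int) : Int :=
  PySem.Int.bxor (PySem.Int.bxor (pvRrB e 6) (pvRrB e 11)) (pvRrB e 25)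

-- _Sigma0(a)
def pvSigma0 (a : Int) : Int :=
  PySem.Int.bxor (PySem.Int.bxor (pvRrB a 2) (pvRrB a 13)) (pvRrB a 22)

-- _ch(e, f, g)  (Python precedence: % binds tighter than ^)
def pvChB (e f g : Int) : Int :=
  PySem.Int.bxor (PySem.Int.band e f) (PySem.Int.mod (PySem.Int.band (Int.not e) g) pvMOD)

-- _maj(a, b, c)
def pvMajB (a b c : Int) : Int :=
  PySem.Int.bxor (PySem.Int.bxor (PySem.Int.band a b) (PySem.Int.band a c)) (PySem.Int.band b c)

-- _round(state, k, wi)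
def pvRoundB (st : Int × Int × Int × Int × Int × Int × Int × Int) (k wi : Int) :
    Int × Int × Int × Int × Int × Int × Int × Int :=
  let (a, b, c, d, e, f, g, h) := st
  let t1 := PySem.Int.mod (h + pvSigma1 e + pvChB e f g + k + wi) pvMOD
  let t2 := PySem.Int.mod (pvSigma0 a + pvMajB a b c) pvMOD
  (PySem.Int.mod (t1 + t2) pvMOD, a, b, c, PySem.Int.mod (d + t1) pvMOD, e, f, g)

-- go(state, i): tail recursion; K[i], W[i] via pyGetD (out of range only where the Python raises)
def pvGoB (W : List Int) (nr : Int)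
    (st : Int × Int × Int × Int × Int × Int × Int × Int) (i : Int) :
    Int × Int × Int × Int × Int × Int × Int × Int :=
  if i ≥ nr then st
  else pvGoB W nr (pvRoundB st (PySem.List.pyGetD pvKB i 0) (PySem.List.pyGetD W i 0)) (i + 1)
termination_by (nr - i).toNat
decreasing_by omega

def sha256_rounds_alt (W : List Int) (nr : Int) : List Int :=
  let st := pvGoB W nr
    (0x6a09e667, 0xbb67ae85, 0x3c6ef372, 0xa54ff53a, 0x510e527f, 0x9b05688c, 0x1f83d9ab, 0x5be0cd19) 0
  let (a, b, c, d, e, f, g, h) := st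
  [a, b, c, d, e, f, g, h]

-- ===== PRECONDITION & SPEC =====
-- Pre_ excludes exactly the inputs where A raises IndexError: nr > 16 (K[i] runs out,
-- or the schedule loop outruns a short W first) or 0 < nr with len(W) < nr (w[i] runs out).
def Pre_sha256_rounds (W : List Int) (nr : Int) : Prop :=
  nr ≤ 16 ∧ (nr ≤ 0 ∨ nr ≤ (W.length : Int))
instance (W : List Int) (nr : Int) : Decidable (Pre_sha256_rounds W nr) := by
  unfold Pre_sha256_rounds; infer_instance

def pvWitness_sha256_rounds : List Int × Int := ([1, 2, 3, 4, 5, 6, 7, 8], 4)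

def Spec_sha256_rounds (W : List Int) (nr : Int) (out : List Int) : Prop := out = sha256_rounds_alt W nr
instance (W : List Int) (nr : Int) (out : List Int) : Decidable (Spec_sha256_rounds W nr out) := by
  unfold Spec_sha256_rounds; infer_instance

-- ===== CLAIM (what is proved, stated in full; the proofs are below) =====
def Claim_equal_sha256_rounds : Prop := ∀ (W : List Int) (nr : Int), Dom_sha256_rounds W nr → Pre_sha256_rounds W nr → Spec_sha256_rounds W nr (sha256_rounds W nr)


-- ===== LEMMAS AND PROOFS =====

-- Python's  x & 0xFFFFFFFF  is  x % 2**32  (on every int)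
theorem pv_band_mask (x : Int) : PySem.Int.band x 0xFFFFFFFF = x % 0x100000000 := by
  have hpos : ∀ n : Nat, n &&& 4294967295 = n % 4294967296 := by
    intro n
    have := Nat.and_two_pow_sub_one_eq_mod n 32
    norm_num at this; omega
  have hm : (4294967295 : Int).toNat = 4294967295 := rfl
  simp only [PySem.Int.band, hm]
  split_ifs
  · have := hpos x.toNat; omega
  · omega
  · have := hpos ((-x - 1).toNat); rw [Nat.and_comm] at this; omega
  · omega

theorem pv_mod_eq_band (x : Int) : PySem.Int.mod x pvMOD = PySem.Int.band x 0xFFFFFFFF := by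
  rw [show pvMOD = 4294967296 from rfl,
      PySem.Int.mod_eq_emod_of_pos (by norm_num : (0 : Int) < 4294967296), pv_band_mask]

-- one round: A's indexed body at i equals B's round on K[i] and W[i]
theorem pv_step_eq (W : List Int) (i : Int) (hi0 : 0 ≤ i) (hi16 : i < 16) (hiW : i < (W.length : Int))
    (st : Int × Int × Int × Int × Int × Int × Int × Int) :
    pvStepA (W.take 16) st i = pvRoundB st (PySem.List.pyGetD pvKB i 0) (PySem.List.pyGetD W i 0) := by
  obtain ⟨a, b, c, d, e, f, g, h⟩ := st
  have hW : PySem.List.pyGetD (W.take 16) i 0 = PySem.List.pyGetD W i 0 := by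
    rw [show i = ((i.toNat : Nat) : Int) by omega, PySem.List.pyGetD_natCast, PySem.List.pyGetD_natCast]
    rw [List.getD_eq_getElem _ _ (by simp [List.length_take]; omega),
        List.getD_eq_getElem _ _ (by omega)]
    exact List.getElem_take
  have hK : PySem.List.pyGetD pvK i 0 = PySem.List.pyGetD pvKB i 0 := rfl
  simp only [pvStepA, pvSigma1, pvSigma0, pvChB, pvMajB, pvRotr, pvRrB,
    pv_mod_eq_band, hW, hK, pvRoundB]

-- B's tail recursion from index i equals A's indexed fold over range(i, nr)
theorem pv_go_eq (W : List Int) (nr : Int) (h16 : nr ≤ 16) (hlen : nr ≤ (W.length : Int)) :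
    ∀ (k : Nat) (i : Int) (st : Int × Int × Int × Int × Int × Int × Int × Int),
      0 ≤ i → (nr - i).toNat = k →
      pvGoB W nr st i
        = (PySem.List.pyRange i nr 1).foldl (pvStepA (W.take 16)) st := by
  intro k
  induction k with
  | zero =>
    intro i st hi hk
    rw [pvGoB, if_pos (by omega : i ≥ nr), PySem.List.pyRange_one_eq_nil (by omega)]
    rfl
  | succ m ih =>
    intro i st hi hk
    have hin : i < nr := by omega
    rw [pvGoB, if_neg (by omega), PySem.List.pyRange_one_cons hin, List.foldl_cons,
        ih (i + 1) _ (by omega) (by omega), pv_step_eq W i hi (by omega) (by omega)]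

theorem pv_schedule_trivial (nr : Int) (h : nr ≤ 16) :
    PySem.List.pyRange 16 (max nr 16) 1 = [] := by
  rw [max_eq_right h]
  exact PySem.List.pyRange_one_eq_nil (le_refl 16)

-- ===== VERDICT (by name: the statements are the Claim_ definitions above) =====
theorem sha256_rounds_spec : Claim_equal_sha256_rounds := by
  intro W nr _ hpre
  obtain ⟨h16, hlen⟩ := hpre
  have hWlen : nr ≤ (W.length : Int) := by
    rcases hlen with h | h
    · have : (0 : Int) ≤ (W.length : Int) := by positivity
      omega
    · exact h
  unfold Spec_sha256_rounds sha256_rounds sha256_rounds_alt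
  rw [pv_schedule_trivial nr h16]
  have hsl : PySem.List.slice W none (some 16) = W.take 16 := by
    rw [PySem.List.slice_to W (by norm_num : (0:Int) ≤ 16)]; rfl
  simp only [List.foldl_nil, hsl]
  rw [pv_go_eq W nr h16 hWlen (nr - 0).toNat 0 _ (le_refl 0) rfl]
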